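-- pv_equiv track=rewrite | github.com/xingdi-eric-yuan/imrc_graph_public | generic.py | get_answer_position
-- ===== SOURCE A (Python) =====
-- def is_sub_list(long_list, short_list):
--     # return True if the short list is a sublist of the long one
--     if long_list is None or short_list is None:
--         return False
--     if len(long_list) == 0 or len(short_list) == 0:
--         return False
--     key = short_list[0]
--     for i in range(len(long_list)):
--         if long_list[i] == key:
--             if long_list[i: i + len(short_list)] == short_list:
--                 return True
--     return False
--
-- def get_answer_position(sentence_ids, answer_ids):
--     res = []
--     for i in range(len(sentence_ids)):
--         if not is_sub_list(sentence_ids[i], answer_ids[i]):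
--             res.append(None)
--         else:
--             tmp = [0, 0]
--             for j in range(len(sentence_ids[i])):
--                 if sentence_ids[i][j] != answer_ids[i][0]:
--                     continue
--                 if sentence_ids[i][j: j + len(answer_ids[i])] == answer_ids[i]:
--                     tmp = [j, j + len(answer_ids[i]) - 1]
--                     tmp = [item + 1 for item in tmp]  # because a special token will be added in front of sentence.
--                     break
--             res.append(tmp)
--     return res
-- ===== SOURCE B (Python) =====
-- def _find_sub(sent, ans):
--     # Rabin-Karp: rolling polynomial hash over a sliding window, slice-verify only on hash hit
--     m, n = len(ans), len(sent)
--     if m == 0 or m > n: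
--         return None
--     B, M = 1000003, (1 << 61) - 1
--     P = pow(B, m - 1, M)
--     target = 0
--     for x in ans:
--         target = (target * B + x) % M
--     h = 0
--     for x in sent[:m]:
--         h = (h * B + x) % M
--     for j in range(n - m + 1):
--         if h == target and sent[j:j + m] == ans:
--             return j
--         if j + m < n:
--             h = ((h - sent[j] * P) * B + sent[j + m]) % M
--     return None
--
-- def get_answer_position(sentence_ids, answer_ids):
--     res = []
--     for sent, ans in zip(sentence_ids, answer_ids):
--         j = _find_sub(sent, ans)
--         res.append(None if j is None else [j + 1, j + len(ans)])
--     return res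
-- ===== Notes on version B (the rewrite author's own statement) =====
-- stated objective: alternative
-- what changed: B replaces A's per-sentence double naive scan (is_sub_list containment check, then a second slice-comparison scan re-finding the match) by a Rabin-Karp search: one rolling polynomial hash over a sliding window, with the O(m) slice comparison performed only on a hash hit; the 1-based span is computed once from the returned index.
import Mathlib
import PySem

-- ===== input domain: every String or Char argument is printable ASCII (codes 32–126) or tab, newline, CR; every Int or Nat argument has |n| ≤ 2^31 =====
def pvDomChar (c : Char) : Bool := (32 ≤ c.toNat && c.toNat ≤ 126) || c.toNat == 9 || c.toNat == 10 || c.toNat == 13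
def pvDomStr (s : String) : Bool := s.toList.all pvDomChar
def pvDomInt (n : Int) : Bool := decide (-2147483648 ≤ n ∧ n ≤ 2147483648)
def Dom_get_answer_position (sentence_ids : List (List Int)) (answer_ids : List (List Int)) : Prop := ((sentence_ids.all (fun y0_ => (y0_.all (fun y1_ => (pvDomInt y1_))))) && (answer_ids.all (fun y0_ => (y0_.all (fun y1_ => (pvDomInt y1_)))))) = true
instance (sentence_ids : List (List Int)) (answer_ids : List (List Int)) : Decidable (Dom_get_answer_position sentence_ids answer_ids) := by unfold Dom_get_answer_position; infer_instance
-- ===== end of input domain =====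

-- B replaces A's two naive scans per sentence by a Rabin-Karp rolling-hash search that
-- slice-verifies only on a hash hit (objective: alternative algorithm).

-- ===== PORT A =====
-- loop body of is_sub_list ('for i in range(len(long_list)): if long_list[i] == key: if slice == short: return True')
def pvIsSubGo (long_list short_list : List Int) (i : Nat) : Bool :=
  if h : i < long_list.length then
    if long_list[i] = short_list.getD 0 0 then
      if PySem.List.slice long_list (some (i : Int)) (some ((i : Int) + (short_list.length : Int))) = short_list then
        true
      else pvIsSubGo long_list short_list (i + 1)
    else pvIsSubGo long_list short_list (i + 1)
  else false
termination_by long_list.length - i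

-- the 'is None' guard of the Python is untypable here (arguments are always lists); the length guard is kept
def is_sub_list (long_list short_list : List Int) : Bool :=
  if long_list.length = 0 ∨ short_list.length = 0 then false
  else pvIsSubGo long_list short_list 0

-- inner 'for j in range(len(sentence_ids[i]))' loop with its break; falls through to tmp = [0, 0]
def pvAInner (si ai : List Int) (j : Nat) : List Int :=
  if h : j < si.length then
    if si[j] ≠ ai.getD 0 0 then pvAInner si ai (j + 1)
    else if PySem.List.slice si (some (j : Int)) (some ((j : Int) + (ai.length : Int))) = ai then
      ([(j : Int), (j : Int) + (ai.length : Int) - 1]).map (· + 1)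
    else pvAInner si ai (j + 1)
  else [0, 0]
termination_by si.length - j

def get_answer_position (sentence_ids : List (List Int)) (answer_ids : List (List Int)) : List (Option (List Int)) :=
  (List.range sentence_ids.length).foldl (fun res i =>
    if ¬ is_sub_list (sentence_ids.getD i []) (answer_ids.getD i []) then res ++ [none]
    else res ++ [some (pvAInner (sentence_ids.getD i []) (answer_ids.getD i []) 0)]) []

-- ===== PORT B =====
def pvBb : Int := 1000003          -- hash base B
def pvMb : Int := 2305843009213693951   -- modulus M = (1 << 61) - 1

-- Python's three-argument pow(B, e, M), ported by its contract (modular exponentiation)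
def pvPowMod (b : Int) (e : Nat) (m : Int) : Int := PySem.Int.mod (b ^ e) m

-- 'for x in l: h = (h * B + x) % M'
def pvHash (l : List Int) : Int :=
  l.foldl (fun h x => PySem.Int.mod (h * pvBb + x) pvMb) 0

-- 'for j in range(n - m + 1): if h == target and sent[j:j+m] == ans: return j;  if j+m < n: roll h'
def pvRKGo (sent ans : List Int) (target P : Int) (j : Nat) (h : Int) : Option Nat :=
  if _hj : j + ans.length ≤ sent.length then
    if h = target ∧ PySem.List.slice sent (some (j : Int)) (some ((j : Int) + (ans.length : Int))) = ans then
      some j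
    else if j + ans.length < sent.length then
      pvRKGo sent ans target P (j + 1)
        (PySem.Int.mod ((h - sent.getD j 0 * P) * pvBb + sent.getD (j + ans.length) 0) pvMb)
    else none
  else none
termination_by sent.length - j
decreasing_by omega

def pvFindSubB (sent ans : List Int) : Option Nat :=
  if ans.length = 0 ∨ sent.length < ans.length then none
  else pvRKGo sent ans (pvHash ans) (pvPowMod pvBb (ans.length - 1) pvMb) 0
         (pvHash (PySem.List.slice sent none (some (ans.length : Int))))

def get_answer_position_alt (sentence_ids : List (List Int)) (answer_ids : List (List Int)) : List (Option (List Int)) :=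
  (sentence_ids.zip answer_ids).map (fun p =>
    match pvFindSubB p.1 p.2 with
    | none => none
    | some j => some [(j : Int) + 1, (j : Int) + (p.2.length : Int)])

-- ===== PRECONDITION & SPEC =====
-- A indexes answer_ids[i] for every i < len(sentence_ids): it raises IndexError when answer_ids is shorter.
def Pre_get_answer_position (sentence_ids : List (List Int)) (answer_ids : List (List Int)) : Prop :=
  sentence_ids.length ≤ answer_ids.length
instance (sentence_ids : List (List Int)) (answer_ids : List (List Int)) : Decidable (Pre_get_answer_position sentence_ids answer_ids) := by unfold Pre_get_answer_position; infer_instance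

def pvWitness_get_answer_position : List (List Int) × List (List Int) := ([[1, 2]], [[2]])

def Spec_get_answer_position (sentence_ids : List (List Int)) (answer_ids : List (List Int)) (out : List (Option (List Int))) : Prop := out = get_answer_position_alt sentence_ids answer_ids
instance (sentence_ids : List (List Int)) (answer_ids : List (List Int)) (out : List (Option (List Int))) : Decidable (Spec_get_answer_position sentence_ids answer_ids out) := by unfold Spec_get_answer_position; infer_instance

-- ===== CLAIM (what is proved, stated in full; the proofs are below) =====
def Claim_equal_get_answer_position : Prop := ∀ (sentence_ids : List (List Int)) (answer_ids : List (List Int)), Dom_get_answer_position sentence_ids answer_ids → Pre_get_answer_position sentence_ids answer_ids → Spec_get_answer_position sentence_ids answer_ids (get_answer_position sentence_ids answer_ids)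

-- ===== LEMMAS AND PROOFS =====

-- the naive first-match search (proof-side specification both ports are reduced to)
def pvNaiveGo (sent ans : List Int) (j : Nat) : Option Nat :=
  if h : (j : Int) < (sent.length : Int) - (ans.length : Int) + 1 then
    if PySem.List.slice sent (some (j : Int)) (some ((j : Int) + (ans.length : Int))) = ans then some j
    else pvNaiveGo sent ans (j + 1)
  else none
termination_by sent.length + 1 - j
decreasing_by omega

def pvNaiveSub (sent ans : List Int) : Option Nat :=
  if sent = [] ∨ ans = [] then none
  else pvNaiveGo sent ans 0

-- a match of ai at j pins down its window
lemma pv_match_facts (si ai : List Int) (j : Nat) (hai : ai ≠ [])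
    (hm : (si.drop j).take ai.length = ai) :
    j + ai.length ≤ si.length ∧ ∀ h : j < si.length, si[j] = ai.getD 0 0 := by
  have hlen : ((si.drop j).take ai.length).length = ai.length := by rw [hm]
  simp only [List.length_take, List.length_drop] at hlen
  have hpos : 0 < ai.length := List.length_pos_iff.mpr hai
  have hle : j + ai.length ≤ si.length := by omega
  refine ⟨hle, fun h => ?_⟩
  have h0 : ((si.drop j).take ai.length).getD 0 0 = ai.getD 0 0 := by rw [hm]
  have heq : ((si.drop j).take ai.length).getD 0 0 = si[j] := by
    rw [List.getD_eq_getElem _ _ (by simp [List.length_take, List.length_drop]; omega)]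
    simp [List.getElem_take, List.getElem_drop]
  exact heq.symm.trans h0

lemma pvNaiveGo_none_of_ge (si ai : List Int) (j : Nat)
    (hb : ¬ ((j : Int) < (si.length : Int) - (ai.length : Int) + 1)) :
    pvNaiveGo si ai j = none := by
  rw [pvNaiveGo]; simp [hb]

-- key per-sentence lemma: the second scan of A computes the span of the first naive match
lemma pvAInner_eq (si ai : List Int) (hai : ai ≠ []) :
    ∀ n j, si.length - j ≤ n →
    pvAInner si ai j =
      (match pvNaiveGo si ai j with
       | some k => [(k : Int) + 1, (k : Int) + (ai.length : Int)]
       | none => ([0, 0] : List Int)) := by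
  intro n
  induction n with
  | zero =>
    intro j hj
    have hge : ¬ j < si.length := by omega
    have hb : ¬ ((j : Int) < (si.length : Int) - (ai.length : Int) + 1) := by
      have : 0 < ai.length := List.length_pos_iff.mpr hai
      omega
    rw [pvAInner, pvNaiveGo]; simp [hge, hb]
  | succ n ih =>
    intro j hj
    by_cases hlt : j < si.length
    · rw [pvAInner]
      simp only [hlt, dif_pos]
      rw [PySem.List.slice_natCast_add]
      by_cases hkey : si[j]'hlt = ai.getD 0 0
      · simp only [hkey, ne_eq, not_true_eq_false, if_false]
        by_cases hm : (si.drop j).take ai.length = ai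
        · have hf := pv_match_facts si ai j hai hm
          have hb : (j : Int) < (si.length : Int) - (ai.length : Int) + 1 := by omega
          have hsome : pvNaiveGo si ai j = some j := by
            rw [pvNaiveGo]; simp [hb, PySem.List.slice_natCast_add, hm]
          rw [hsome]
          simp [hm]
          try omega
        · simp only [hm, if_false]
          have hstep : pvNaiveGo si ai j = pvNaiveGo si ai (j + 1) := by
            by_cases hb : (j : Int) < (si.length : Int) - (ai.length : Int) + 1
            · rw [pvNaiveGo]; simp [hb, PySem.List.slice_natCast_add, hm]
            · rw [pvNaiveGo_none_of_ge si ai j hb, pvNaiveGo_none_of_ge si ai (j + 1) (by push_cast at hb ⊢; omega)]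
          rw [ih (j + 1) (by omega), ← hstep]
      · simp only [hkey, ne_eq, not_false_eq_true, if_true]
        have hm : (si.drop j).take ai.length ≠ ai := by
          intro hm
          exact hkey ((pv_match_facts si ai j hai hm).2 hlt)
        have hstep : pvNaiveGo si ai j = pvNaiveGo si ai (j + 1) := by
          by_cases hb : (j : Int) < (si.length : Int) - (ai.length : Int) + 1
          · rw [pvNaiveGo]; simp [hb, PySem.List.slice_natCast_add, hm]
          · rw [pvNaiveGo_none_of_ge si ai j hb, pvNaiveGo_none_of_ge si ai (j + 1) (by push_cast at hb ⊢; omega)]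
        rw [ih (j + 1) (by omega), ← hstep]
    · have hb : ¬ ((j : Int) < (si.length : Int) - (ai.length : Int) + 1) := by
        have : 0 < ai.length := List.length_pos_iff.mpr hai
        omega
      rw [pvAInner, pvNaiveGo]; simp [hlt, hb]

-- A's first scan is exactly 'the naive search succeeds'
lemma pvIsSubGo_eq (si ai : List Int) (hai : ai ≠ []) :
    ∀ n j, si.length - j ≤ n →
    pvIsSubGo si ai j = (pvNaiveGo si ai j).isSome := by
  intro n
  induction n with
  | zero =>
    intro j hj
    have hge : ¬ j < si.length := by omega
    have hb : ¬ ((j : Int) < (si.length : Int) - (ai.length : Int) + 1) := by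
      have : 0 < ai.length := List.length_pos_iff.mpr hai
      omega
    rw [pvIsSubGo, pvNaiveGo]; simp [hge, hb]
  | succ n ih =>
    intro j hj
    by_cases hlt : j < si.length
    · rw [pvIsSubGo]
      simp only [hlt, dif_pos]
      rw [PySem.List.slice_natCast_add]
      by_cases hkey : si[j]'hlt = ai.getD 0 0
      · simp only [hkey, if_true]
        by_cases hm : (si.drop j).take ai.length = ai
        · have hf := pv_match_facts si ai j hai hm
          have hb : (j : Int) < (si.length : Int) - (ai.length : Int) + 1 := by omega
          have hsome : pvNaiveGo si ai j = some j := by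
            rw [pvNaiveGo]; simp [hb, PySem.List.slice_natCast_add, hm]
          rw [hsome]; simp [hm]
        · simp only [hm, if_false]
          have hstep : pvNaiveGo si ai j = pvNaiveGo si ai (j + 1) := by
            by_cases hb : (j : Int) < (si.length : Int) - (ai.length : Int) + 1
            · rw [pvNaiveGo]; simp [hb, PySem.List.slice_natCast_add, hm]
            · rw [pvNaiveGo_none_of_ge si ai j hb, pvNaiveGo_none_of_ge si ai (j + 1) (by push_cast at hb ⊢; omega)]
          rw [ih (j + 1) (by omega), ← hstep]
      · simp only [hkey, if_false]
        have hm : (si.drop j).take ai.length ≠ ai := by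
          intro hm
          exact hkey ((pv_match_facts si ai j hai hm).2 hlt)
        have hstep : pvNaiveGo si ai j = pvNaiveGo si ai (j + 1) := by
          by_cases hb : (j : Int) < (si.length : Int) - (ai.length : Int) + 1
          · rw [pvNaiveGo]; simp [hb, PySem.List.slice_natCast_add, hm]
          · rw [pvNaiveGo_none_of_ge si ai j hb, pvNaiveGo_none_of_ge si ai (j + 1) (by push_cast at hb ⊢; omega)]
        rw [ih (j + 1) (by omega), ← hstep]
    · have hb : ¬ ((j : Int) < (si.length : Int) - (ai.length : Int) + 1) := by
        have : 0 < ai.length := List.length_pos_iff.mpr hai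
        omega
      rw [pvIsSubGo, pvNaiveGo]; simp [hlt, hb]

-- per-sentence agreement of A's pipeline with the naive search
lemma pv_pair_eq (si ai : List Int) :
    (if ¬ is_sub_list si ai then (none : Option (List Int)) else some (pvAInner si ai 0))
    = (match pvNaiveSub si ai with
       | none => none
       | some j => some [(j : Int) + 1, (j : Int) + (ai.length : Int)]) := by
  by_cases hsi : si = []
  · subst hsi; simp [is_sub_list, pvNaiveSub]
  · by_cases hai : ai = []
    · subst hai; simp [is_sub_list, pvNaiveSub]
    · have h1 : is_sub_list si ai = (pvNaiveGo si ai 0).isSome := by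
        rw [is_sub_list]
        simp [hsi, hai]
        exact pvIsSubGo_eq si ai hai si.length 0 (by omega)
      have h2 : pvNaiveSub si ai = pvNaiveGo si ai 0 := by simp [pvNaiveSub, hsi, hai]
      rw [h1, h2]
      cases hgo : pvNaiveGo si ai 0 with
      | none => simp
      | some k =>
        simp only [Option.isSome_some, not_true_eq_false, if_false]
        rw [pvAInner_eq si ai hai si.length 0 (by omega), hgo]

-- ---------- Rabin-Karp side ----------

lemma pvMb_pos : (0 : Int) < pvMb := by norm_num [pvMb]

lemma pv_mod_eq (a : Int) : PySem.Int.mod a pvMb = a % pvMb :=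
  PySem.Int.mod_eq_emod_of_pos pvMb_pos

-- the plain (un-modded) polynomial value of a list
def pvPolyF (h : Int) (l : List Int) : Int := l.foldl (fun h x => h * pvBb + x) h

lemma pvPolyF_from (l : List Int) : ∀ h : Int, pvPolyF h l = h * pvBb ^ l.length + pvPolyF 0 l := by
  induction l with
  | nil => intro h; simp [pvPolyF]
  | cons x t ih =>
    intro h
    simp only [pvPolyF, List.foldl_cons, List.length_cons] at *
    rw [ih (h * pvBb + x), ih (0 * pvBb + x)]
    ring

-- the modded fold equals the plain polynomial mod M
lemma pvHashF_eq (l : List Int) : ∀ h1 h2 : Int, h1 = h2 % pvMb →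
    l.foldl (fun h x => PySem.Int.mod (h * pvBb + x) pvMb) h1 = pvPolyF h2 l % pvMb := by
  induction l with
  | nil => intro h1 h2 hh; simpa [pvPolyF] using hh
  | cons x t ih =>
    intro h1 h2 hh
    simp only [List.foldl_cons]
    have hstep : PySem.Int.mod (h1 * pvBb + x) pvMb = (h2 * pvBb + x) % pvMb := by
      rw [pv_mod_eq]
      subst hh
      exact (Int.ModEq.mul_right pvBb (Int.emod_emod_of_dvd h2 dvd_rfl)).add_right x
    exact ih _ _ hstep

lemma pvHash_eq (l : List Int) : pvHash l = pvPolyF 0 l % pvMb := by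
  have h0 : (0 : Int) = 0 % pvMb := by simp
  simpa [pvHash] using pvHashF_eq l 0 0 h0

-- rolling update: sliding the window by one preserves 'h = hash of the window'
lemma pv_roll (sent ans : List Int) (j : Nat) (hai : ans ≠ [])
    (hlt : j + ans.length < sent.length) :
    PySem.Int.mod ((pvHash ((sent.drop j).take ans.length)
        - sent.getD j 0 * pvPowMod pvBb (ans.length - 1) pvMb) * pvBb
        + sent.getD (j + ans.length) 0) pvMb
      = pvHash ((sent.drop (j + 1)).take ans.length) := by
  unfold pvPowMod
  have hm : 0 < ans.length := List.length_pos_iff.mpr hai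
  obtain ⟨k, hk⟩ : ∃ k, ans.length = k + 1 := ⟨ans.length - 1, by omega⟩
  have hjlt : j < sent.length := by omega
  have hd : sent.drop j = sent[j] :: sent.drop (j + 1) := List.drop_eq_getElem_cons hjlt
  set x := sent.getD (j + ans.length) 0 with hxd
  have hx : x = sent[j + ans.length]'hlt := List.getD_eq_getElem sent 0 hlt
  set t := (sent.drop (j + 1)).take k with htd
  have htlen : t.length = k := by
    rw [htd]; simp [List.length_take, List.length_drop]; omega
  have hw : (sent.drop j).take ans.length = sent[j] :: t := by
    rw [htd, hk, hd]
    exact List.take_succ_cons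
  have hsome : (sent.drop (j + 1))[k]? = some x := by
    rw [List.getElem?_drop, show j + 1 + k = j + ans.length from by omega,
      List.getElem?_eq_getElem hlt, hx]
  have hw' : (sent.drop (j + 1)).take ans.length = t ++ [x] := by
    rw [hk, List.take_add_one, hsome, htd]
    simp
  have hgj : sent.getD j 0 = sent[j] := List.getD_eq_getElem sent 0 hjlt
  have hpoly_old : pvPolyF 0 ((sent.drop j).take ans.length)
      = sent[j] * pvBb ^ k + pvPolyF 0 t := by
    rw [hw]
    calc pvPolyF 0 (sent[j] :: t) = pvPolyF (0 * pvBb + sent[j]) t := rfl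
      _ = (0 * pvBb + sent[j]) * pvBb ^ t.length + pvPolyF 0 t := pvPolyF_from t _
      _ = sent[j] * pvBb ^ k + pvPolyF 0 t := by rw [htlen]; ring
  have hpoly_new : pvPolyF 0 ((sent.drop (j + 1)).take ans.length)
      = pvPolyF 0 t * pvBb + x := by
    rw [hw']; simp [pvPolyF, List.foldl_append]
  rw [pv_mod_eq, pv_mod_eq, pvHash_eq, pvHash_eq, hpoly_old, hpoly_new, hgj,
    show ans.length - 1 = k from by omega]
  have h1 : (sent[j] * pvBb ^ k + pvPolyF 0 t) % pvMb
      ≡ sent[j] * pvBb ^ k + pvPolyF 0 t [ZMOD pvMb] := Int.emod_emod_of_dvd _ dvd_rfl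
  have h2 : (pvBb ^ k) % pvMb ≡ pvBb ^ k [ZMOD pvMb] := Int.emod_emod_of_dvd _ dvd_rfl
  have hfinal : ((sent[j] * pvBb ^ k + pvPolyF 0 t) % pvMb
        - sent[j] * (pvBb ^ k % pvMb)) * pvBb + x
      ≡ pvPolyF 0 t * pvBb + x [ZMOD pvMb] := by
    calc ((sent[j] * pvBb ^ k + pvPolyF 0 t) % pvMb
          - sent[j] * (pvBb ^ k % pvMb)) * pvBb + x
        ≡ ((sent[j] * pvBb ^ k + pvPolyF 0 t) - sent[j] * pvBb ^ k) * pvBb + x [ZMOD pvMb] :=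
          (Int.ModEq.mul_right pvBb (h1.sub (Int.ModEq.mul_left _ h2))).add_right x
      _ = pvPolyF 0 t * pvBb + x := by ring
  exact hfinal

-- the Rabin-Karp loop, run with the correct window hash, is the naive first-match search
lemma pvRKGo_eq (sent ans : List Int) (hai : ans ≠ []) :
    ∀ fuel j, sent.length - j ≤ fuel → j + ans.length ≤ sent.length →
    pvRKGo sent ans (pvHash ans) (pvPowMod pvBb (ans.length - 1) pvMb) j
      (pvHash ((sent.drop j).take ans.length)) = pvNaiveGo sent ans j := by
  intro fuel
  induction fuel with
  | zero =>
    intro j hf hj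
    have : 0 < ans.length := List.length_pos_iff.mpr hai
    omega
  | succ n ih =>
    intro j hf hj
    have hb : (j : Int) < (sent.length : Int) - (ans.length : Int) + 1 := by omega
    rw [pvRKGo, pvNaiveGo]
    simp only [hj, dif_pos, hb, dif_pos]
    rw [PySem.List.slice_natCast_add]
    by_cases hmatch : (sent.drop j).take ans.length = ans
    · simp [hmatch]
    · have hne : ¬ (pvHash ((sent.drop j).take ans.length) = pvHash ans
          ∧ (sent.drop j).take ans.length = ans) := fun ⟨_, hm⟩ => hmatch hm
      rw [if_neg hne, if_neg hmatch]
      by_cases hlt : j + ans.length < sent.length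
      · rw [if_pos hlt, pv_roll sent ans j hai hlt]
        exact ih (j + 1) (by omega) (by omega)
      · rw [if_neg hlt]
        have hstop : ¬ ((j + 1 : Nat) : Int) < (sent.length : Int) - (ans.length : Int) + 1 := by
          push_cast; omega
        rw [pvNaiveGo_none_of_ge sent ans (j + 1) hstop]

-- B's per-sentence search equals the naive search
lemma pvFindSubB_eq (si ai : List Int) : pvFindSubB si ai = pvNaiveSub si ai := by
  by_cases hai : ai = []
  · subst hai; simp [pvFindSubB, pvNaiveSub]
  · have hm : 0 < ai.length := List.length_pos_iff.mpr hai
    by_cases hn : si.length < ai.length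
    · have hsub : pvFindSubB si ai = none := by simp [pvFindSubB, hn]
      rw [hsub]
      by_cases hsi : si = []
      · simp [pvNaiveSub, hsi]
      · have hb : ¬ ((0 : Nat) : Int) < (si.length : Int) - (ai.length : Int) + 1 := by
          push_cast; omega
        simp [pvNaiveSub, hsi, hai, pvNaiveGo_none_of_ge si ai 0 hb]
    · replace hn : ai.length ≤ si.length := by omega
      have hsi : si ≠ [] := by
        intro h; subst h
        simp only [List.length_nil, Nat.le_zero] at hn
        omega
      have hslice : PySem.List.slice si none (some ((ai.length : Nat) : Int)) = si.take ai.length :=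
        PySem.List.slice_to_natCast si ai.length
      have hwin : si.take ai.length = (si.drop 0).take ai.length := by simp
      rw [pvFindSubB]
      simp only [hai, List.length_eq_zero_iff, false_or]
      rw [if_neg (by omega), hslice, hwin,
        pvRKGo_eq si ai hai si.length 0 (by omega) (by omega)]
      simp [pvNaiveSub, hsi, hai]

-- ===== VERDICT (by name: the statement is the Claim_ definition above) =====
theorem get_answer_position_spec : Claim_equal_get_answer_position := by
  intro s a _ hpre
  unfold Spec_get_answer_position get_answer_position get_answer_position_alt
  have hbody :
      (fun (res : List (Option (List Int))) (i : Nat) =>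
        if ¬ is_sub_list (s.getD i []) (a.getD i []) then res ++ [none]
        else res ++ [some (pvAInner (s.getD i []) (a.getD i []) 0)])
      = (fun res i => res ++ [if ¬ is_sub_list (s.getD i []) (a.getD i []) then none
                              else some (pvAInner (s.getD i []) (a.getD i []) 0)]) := by
    funext res i; split <;> rfl
  rw [hbody, PySem.List.foldl_append_singleton_eq_map]
  have hlen : s.length ≤ a.length := hpre
  apply List.ext_getElem
  · simp [hlen]
  · intro i h1 h2
    simp only [List.nil_append, List.length_map, List.length_range] at h1
    simp only [List.nil_append, List.getElem_map, List.getElem_range, List.getElem_zip]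
    rw [List.getD_eq_getElem s [] h1, List.getD_eq_getElem a [] (by omega)]
    rw [pvFindSubB_eq]
    exact pv_pair_eq _ _
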